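-- pv_equiv track=rewrite | github.com/Zahid-Ham/Matrix-Cyber | backend/agents/command_injection_agent.py | _detect_windows_target
-- ===== SOURCE A (Python) =====
-- from typing import List, Dict, Any, Optional, Tuple, Set
--
-- def _detect_windows_target(
--
--         technology_stack: Optional[List[str]],
--         target_url: str
-- ) -> bool:
--     """Detect if target is likely Windows-based."""
--     if not technology_stack:
--         return False
--
--     windows_indicators = ['iis', 'asp.net', 'windows', 'microsoft', '.aspx']
--     tech_lower = [t.lower() for t in technology_stack]
--
--     return any(indicator in ' '.join(tech_lower) for indicator in windows_indicators)
-- ===== SOURCE B (Python) =====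
-- def _detect_windows_target(technology_stack, target_url):
--     """Detect if target is likely Windows-based."""
--     if technology_stack is None:
--         return False
--     # Scan the stack element-wise with an explicit loop and early return,
--     # probing each lowered element with str.find for every indicator
--     # (none of which contains a space, so A's ' '.join scan finds no more).
--     for tech in technology_stack:
--         t = tech.lower()
--         if (t.find('iis') >= 0 or t.find('asp.net') >= 0
--                 or t.find('windows') >= 0 or t.find('microsoft') >= 0
--                 or t.find('.aspx') >= 0):
--             return True
--     return False
-- ===== Notes on version B (the rewrite author's own statement) =====
-- stated objective: simpler
-- what changed: B replaces A's lowered-list construction and substring search over one ' '.join-concatenated string by an explicit element-wise loop with early return that probes each lowered element with str.find per indicator; equivalent because no indicator contains a space, so no match can span a join boundary.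
import Mathlib
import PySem

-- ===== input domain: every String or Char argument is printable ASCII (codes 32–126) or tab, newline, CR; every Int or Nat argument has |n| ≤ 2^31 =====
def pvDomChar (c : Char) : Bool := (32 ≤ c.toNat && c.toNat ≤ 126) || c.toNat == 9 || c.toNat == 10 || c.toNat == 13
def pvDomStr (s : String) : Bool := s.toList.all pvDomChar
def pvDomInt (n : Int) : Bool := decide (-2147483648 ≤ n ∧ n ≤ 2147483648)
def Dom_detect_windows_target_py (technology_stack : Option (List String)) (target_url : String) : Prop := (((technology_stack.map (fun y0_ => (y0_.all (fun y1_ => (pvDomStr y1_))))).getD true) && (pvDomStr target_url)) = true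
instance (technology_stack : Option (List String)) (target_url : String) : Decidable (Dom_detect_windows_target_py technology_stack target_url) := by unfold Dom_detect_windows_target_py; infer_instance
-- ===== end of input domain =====

-- B scans the stack element-wise with an explicit early-return loop, probing each lowered
-- element via str.find per indicator, instead of A's substring search over a ' '-joined string;
-- equivalent since no indicator contains a space.


-- ===== PORT A =====
def detect_windows_target_py (technology_stack : Option (List String)) (target_url : String) : Bool :=
  match technology_stack with
  | none => false                                     -- 'if not technology_stack: return False' (None)
  | some stack =>
    if stack.isEmpty then false                       -- 'if not technology_stack' (empty list)
    else
      let windows_indicators : List String := ["iis", "asp.net", "windows", "microsoft", ".aspx"]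
      let tech_lower := stack.map PySem.Str.lower
      windows_indicators.any (fun indicator =>
        PySem.Str.isIn indicator (PySem.Str.join " " tech_lower))

-- ===== PORT B =====
-- the big 'or' of str.find probes inside B's loop body
def pvHasWinIndicator (t : String) : Bool :=
  decide (0 ≤ PySem.Str.find t "iis") || decide (0 ≤ PySem.Str.find t "asp.net")
    || decide (0 ≤ PySem.Str.find t "windows") || decide (0 ≤ PySem.Str.find t "microsoft")
    || decide (0 ≤ PySem.Str.find t ".aspx")

-- B's 'for tech in technology_stack: … return True' loop with its final 'return False'
def pvWinScan : List String → Bool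
  | [] => false
  | tech :: rest =>
    if pvHasWinIndicator (PySem.Str.lower tech) then true else pvWinScan rest

def detect_windows_target_py_alt (technology_stack : Option (List String)) (target_url : String) : Bool :=
  match technology_stack with
  | none => false
  | some stack => pvWinScan stack

-- ===== PRECONDITION & SPEC =====
def Spec_detect_windows_target_py (technology_stack : Option (List String)) (target_url : String) (out : Bool) : Prop := out = detect_windows_target_py_alt technology_stack target_url
instance (technology_stack : Option (List String)) (target_url : String) (out : Bool) : Decidable (Spec_detect_windows_target_py technology_stack target_url out) := by unfold Spec_detect_windows_target_py; infer_instance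

-- ===== CLAIM (what is proved, stated in full; the proofs are below) =====
def Claim_equal_detect_windows_target_py : Prop := ∀ (technology_stack : Option (List String)) (target_url : String), Dom_detect_windows_target_py technology_stack target_url → Spec_detect_windows_target_py technology_stack target_url (detect_windows_target_py technology_stack target_url)

-- ===== LEMMAS AND PROOFS =====

-- A space-free prefix of `a ++ ' ' :: b` is a prefix of `a`.
lemma prefix_of_prefix_append_space (sub : List Char) (hns : ' ' ∉ sub) :
    ∀ (a b : List Char), sub <+: a ++ ' ' :: b → sub <+: a := by
  induction sub with
  | nil => intro a b _; exact List.nil_prefix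
  | cons x s ih =>
    intro a b hp
    cases a with
    | nil =>
      rw [List.nil_append, List.cons_prefix_cons] at hp
      exact absurd (hp.1 ▸ List.mem_cons_self ..) hns
    | cons c a' =>
      rw [List.cons_append, List.cons_prefix_cons] at hp
      rw [List.cons_prefix_cons]
      exact ⟨hp.1, ih (fun hm => hns (List.mem_cons_of_mem _ hm)) a' b hp.2⟩

-- A space-free infix of `a ++ ' ' :: b` lies entirely within `a` or within `b`.
lemma infix_append_space (sub : List Char) (hns : ' ' ∉ sub) :
    ∀ (a b : List Char), (sub <:+: a ++ ' ' :: b ↔ sub <:+: a ∨ sub <:+: b) := by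
  intro a
  induction a with
  | nil =>
    intro b
    rw [List.nil_append, List.infix_cons_iff]
    constructor
    · rintro (hp | hi)
      · cases sub with
        | nil => exact Or.inl List.nil_infix
        | cons x s =>
          rw [List.cons_prefix_cons] at hp
          exact absurd (hp.1 ▸ List.mem_cons_self ..) hns
      · exact Or.inr hi
    · rintro (hi | hi)
      · rw [List.infix_nil] at hi
        exact Or.inr (hi ▸ List.nil_infix)
      · exact Or.inr hi
  | cons c a' ih =>
    intro b
    rw [List.cons_append, List.infix_cons_iff, ih b, List.infix_cons_iff]
    constructor
    · rintro (hp | hi | hb)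
      · exact Or.inl (Or.inl (prefix_of_prefix_append_space sub hns (c :: a') b hp))
      · exact Or.inl (Or.inr hi)
      · exact Or.inr hb
    · rintro ((hp | hi) | hb)
      · exact Or.inl (hp.trans (List.prefix_append (c :: a') (' ' :: b)))
      · exact Or.inr (Or.inl hi)
      · exact Or.inr (Or.inr hb)

-- A space-free substring of ' '.join(parts) occurs within one of the parts (parts nonempty).
lemma infix_join_space (sub : List Char) (hns : ' ' ∉ sub) :
    ∀ (parts : List (List Char)), parts ≠ [] →
      (sub <:+: PySem.Chars.join [' '] parts ↔ ∃ p ∈ parts, sub <:+: p) := by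
  intro parts
  induction parts with
  | nil => intro h; exact absurd rfl h
  | cons p rest ih =>
    intro _
    cases rest with
    | nil => simp [PySem.Chars.join_singleton]
    | cons q rest' =>
      rw [PySem.Chars.join_cons_cons, List.append_assoc, List.singleton_append,
        infix_append_space sub hns, ih (by simp)]
      constructor
      · rintro (h | ⟨t, ht, h⟩)
        · exact ⟨p, List.mem_cons_self .., h⟩
        · exact ⟨t, List.mem_cons_of_mem _ ht, h⟩
      · rintro ⟨t, ht, h⟩
        rcases List.mem_cons.mp ht with rfl | ht
        · exact Or.inl h
        · exact Or.inr ⟨t, ht, h⟩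

lemma indicators_space_free :
    ∀ ind ∈ (["iis", "asp.net", "windows", "microsoft", ".aspx"] : List String),
      ' ' ∉ ind.toList := by decide

-- B's per-element test, characterised: some indicator occurs in t.
lemma pvHasWinIndicator_iff (t : String) :
    pvHasWinIndicator t = true ↔
      ∃ ind ∈ (["iis", "asp.net", "windows", "microsoft", ".aspx"] : List String),
        ind.toList <:+: t.toList := by
  unfold pvHasWinIndicator
  simp only [Bool.or_eq_true, decide_eq_true_eq, PySem.Str.find_nonneg_iff]
  constructor
  · rintro ((((h | h) | h) | h) | h) <;>
      [exact ⟨"iis", by simp, h⟩; exact ⟨"asp.net", by simp, h⟩;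
       exact ⟨"windows", by simp, h⟩; exact ⟨"microsoft", by simp, h⟩;
       exact ⟨".aspx", by simp, h⟩]
  · rintro ⟨ind, hind, h⟩
    fin_cases hind <;> simp_all

-- B's loop, characterised: some element passes the per-element test.
lemma pvWinScan_iff (stack : List String) :
    pvWinScan stack = true ↔ ∃ t ∈ stack, pvHasWinIndicator (PySem.Str.lower t) = true := by
  induction stack with
  | nil => simp [pvWinScan]
  | cons tech rest ih =>
    unfold pvWinScan
    split_ifs with h
    · simp [h, List.mem_cons]
    · rw [ih]
      constructor
      · rintro ⟨t, ht, hh⟩; exact ⟨t, List.mem_cons_of_mem _ ht, hh⟩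
      · rintro ⟨t, ht, hh⟩
        rcases List.mem_cons.mp ht with rfl | ht
        · exact absurd hh h
        · exact ⟨t, ht, hh⟩

-- ===== VERDICT (by name: the statement is the Claim_ definition above) =====
theorem detect_windows_target_py_spec : Claim_equal_detect_windows_target_py := by
  intro technology_stack target_url _
  unfold Spec_detect_windows_target_py detect_windows_target_py detect_windows_target_py_alt
  cases technology_stack with
  | none => rfl
  | some stack =>
    simp only
    by_cases hemp : stack.isEmpty
    · obtain rfl : stack = [] := List.isEmpty_iff.mp hemp
      rfl
    · simp only [hemp, if_neg, Bool.false_eq_true, not_false_iff]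
      rw [Bool.eq_iff_iff, pvWinScan_iff]
      simp only [List.any_eq_true, PySem.Str.isIn_iff_infix, PySem.Str.toList_join,
        List.map_map, Function.comp_def, pvHasWinIndicator_iff]
      have hsn : stack ≠ [] := fun h => hemp (h ▸ rfl)
      have hparts : (stack.map fun s => (PySem.Str.lower s).toList) ≠ [] :=
        fun h => hsn (List.map_eq_nil_iff.mp h)
      constructor
      · rintro ⟨ind, hind, hinf⟩
        rw [show (" " : String).toList = [' '] from rfl,
          infix_join_space _ (indicators_space_free ind hind) _ hparts] at hinf
        obtain ⟨p, hp, hsub⟩ := hinf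
        obtain ⟨t, ht, rfl⟩ := List.mem_map.mp hp
        exact ⟨t, ht, ind, hind, hsub⟩
      · rintro ⟨t, ht, ind, hind, hsub⟩
        refine ⟨ind, hind, ?_⟩
        rw [show (" " : String).toList = [' '] from rfl,
          infix_join_space _ (indicators_space_free ind hind) _ hparts]
        exact ⟨(PySem.Str.lower t).toList, List.mem_map_of_mem ht, hsub⟩
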